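-- pv_equiv track=rewrite | github.com/martinrises/fdskalfjsdl | get_balance.py | get_first_in_index
-- ===== SOURCE A (Python) =====
-- def get_first_in_index(list_src, list_target):
-- 	for i in range(len(list_src)):
-- 		_ = list_src[i]
-- 		for j in range(len(list_target)):
-- 			_j = list_target[j]
-- 			_j = _j[:len(_j) - 1]
-- 			if _ == _j:
-- 				return i
-- 	return -1
-- ===== SOURCE B (Python) =====
-- def get_first_in_index(list_src, list_target):
--     # Scan targets instead of src: take the minimum first-occurrence index
--     # in list_src over all trimmed targets; -1 if none occurs.
--     best = -1
--     for t in list_target: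
--         key = t[:len(t) - 1]
--         if key in list_src:
--             i = list_src.index(key)
--             if best == -1 or i < best:
--                 best = i
--     return best
-- ===== Notes on version B (the rewrite author's own statement) =====
-- stated objective: alternative
-- what changed: B inverts the traversal: instead of scanning src and short-circuiting on a nested interpreted membership scan over targets, it makes one pass over the targets, looks up each trimmed target's first index in src with 'in'/list.index, and reduces by minimum with a -1 sentinel.
import Mathlib
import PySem

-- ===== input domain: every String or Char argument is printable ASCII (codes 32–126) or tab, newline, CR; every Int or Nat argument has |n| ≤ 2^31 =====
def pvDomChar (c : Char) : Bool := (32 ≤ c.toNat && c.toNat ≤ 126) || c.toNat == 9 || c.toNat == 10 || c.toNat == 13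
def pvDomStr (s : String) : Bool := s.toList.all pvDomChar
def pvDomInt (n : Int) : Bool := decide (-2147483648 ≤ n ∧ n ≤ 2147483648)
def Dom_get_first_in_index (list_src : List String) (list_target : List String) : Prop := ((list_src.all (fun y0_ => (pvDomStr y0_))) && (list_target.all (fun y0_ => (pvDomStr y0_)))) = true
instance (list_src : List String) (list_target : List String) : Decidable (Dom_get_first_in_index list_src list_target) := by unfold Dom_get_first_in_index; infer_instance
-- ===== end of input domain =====

-- B scans the targets and min-reduces the first-occurrence index of each trimmed target in src,
-- instead of A's scan over src with a nested scan over targets; same cost, different decomposition.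

-- t[:len(t) - 1]  (shared helper: both Pythons compute exactly this slice)
def pyTrim (t : String) : String := PySem.Str.slice t none (some (PySem.Str.len t - 1))

-- ===== PORT A =====
-- inner loop: 'for j in range(len(list_target)): … ; if _ == _j: return i'
def aInner (s : String) : List String → Bool
  | [] => false
  | t :: rest => if s == pyTrim t then true else aInner s rest

-- outer loop: 'for i in range(len(list_src)):' with early return of i
def aOuter (tgt : List String) : List String → Int → Int
  | [], _ => -1
  | s :: rest, i => if aInner s tgt then i else aOuter tgt rest (i + 1)

def get_first_in_index (list_src : List String) (list_target : List String) : Int :=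
  aOuter list_target list_src 0

-- ===== PORT B =====
-- loop body: 'if key in list_src: i = list_src.index(key); if best == -1 or i < best: best = i'
def bStep (src : List String) (best : Int) (t : String) : Int :=
  match PySem.List.index? src (pyTrim t) with
  | none => best
  | some i => if best = -1 ∨ (i : Int) < best then (i : Int) else best

def get_first_in_index_alt (list_src : List String) (list_target : List String) : Int :=
  list_target.foldl (bStep list_src) (-1)

-- ===== PRECONDITION & SPEC =====
def Spec_get_first_in_index (list_src : List String) (list_target : List String) (out : Int) : Prop := out = get_first_in_index_alt list_src list_target
instance (list_src : List String) (list_target : List String) (out : Int) : Decidable (Spec_get_first_in_index list_src list_target out) := by unfold Spec_get_first_in_index; infer_instance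

-- ===== CLAIM (what is proved, stated in full; the proofs are below) =====
def Claim_equal_get_first_in_index : Prop := ∀ (list_src : List String) (list_target : List String), Dom_get_first_in_index list_src list_target → Spec_get_first_in_index list_src list_target (get_first_in_index list_src list_target)

-- ===== LEMMAS AND PROOFS =====

-- the list of first-occurrence indices B's loop minimises over
def mIdx (src tgt : List String) : List Nat :=
  tgt.filterMap (fun t => PySem.List.index? src (pyTrim t))

-- B's min-with-(-1)-sentinel step, on an optional candidate index
def combine (b : Int) : Option Nat → Int
  | none => b
  | some m => if b = -1 ∨ (m : Int) < b then (m : Int) else b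

-- first index of src whose element matches some trimmed target (A's answer, as an Option Nat)
def firstIdx (tgt : List String) : List String → Option Nat
  | [] => none
  | s :: rest => if aInner s tgt then some 0 else (firstIdx tgt rest).map (· + 1)

-- -1 if none, else the index
def optInt (o : Option Nat) : Int := o.elim (-1) (fun j => (j : Int))

theorem bStep_eq (src : List String) (b : Int) (t : String) :
    bStep src b t = combine b (PySem.List.index? src (pyTrim t)) := by
  cases h : PySem.List.index? src (pyTrim t) <;> simp only [bStep, combine, h]

theorem combine_combine (b : Int) (i m : Nat) :
    combine (combine b (some i)) (some m) = combine b (some (min i m)) := by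
  simp only [combine, Nat.min_def]
  split_ifs <;> first | omega | (simp_all; omega)

theorem fold_eq (src : List String) :
    ∀ (ts : List String) (b : Int),
      ts.foldl (bStep src) b = combine b (mIdx src ts).min? := by
  intro ts
  induction ts with
  | nil => intro b; simp [mIdx, combine]
  | cons t rest ih =>
    intro b
    rw [List.foldl_cons, bStep_eq]
    cases ho : PySem.List.index? src (pyTrim t) with
    | none =>
      show List.foldl (bStep src) b rest = _
      rw [ih b]
      have hm : mIdx src (t :: rest) = mIdx src rest := by
        simp only [mIdx, List.filterMap_cons, ho]
      rw [hm]
    | some i =>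
      rw [ih]
      have hm : mIdx src (t :: rest) = i :: mIdx src rest := by
        simp only [mIdx, List.filterMap_cons, ho]
      rw [hm, List.min?_cons]
      cases hmin : (mIdx src rest).min? with
      | none => simp only [Option.elim, combine]
      | some m => simp only [Option.elim_some]; exact combine_combine b i m
  
theorem combine_neg_one (o : Option Nat) : combine (-1) o = optInt o := by
  cases o with
  | none => rfl
  | some m => simp [combine, optInt]

theorem aInner_iff (tgt : List String) (s : String) :
    aInner s tgt = true ↔ ∃ t ∈ tgt, s = pyTrim t := by
  induction tgt with
  | nil => simp [aInner]
  | cons t rest ih =>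
    by_cases h : s == pyTrim t
    · simp [aInner, h]
      exact Or.inl (eq_of_beq h)
    · simp [aInner, h, ih]
      intro heq
      exact absurd (beq_iff_eq.mpr heq) h

theorem aOuter_eq (tgt : List String) :
    ∀ (src : List String) (i : Int),
      aOuter tgt src i = (firstIdx tgt src).elim (-1) (fun j => i + (j : Int)) := by
  intro src
  induction src with
  | nil => intro i; rfl
  | cons s rest ih =>
    intro i
    by_cases h : aInner s tgt = true
    · simp [aOuter, firstIdx, h]
    · simp only [aOuter, firstIdx, h, Bool.false_eq_true, if_false]
      rw [ih (i + 1)]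
      cases hf : firstIdx tgt rest with
      | none => rfl
      | some j =>
        simp only [Option.map_some, Option.elim_some]
        push_cast
        ring

theorem min?_map_succ (L : List Nat) : (L.map (· + 1)).min? = L.min?.map (· + 1) := by
  induction L with
  | nil => simp
  | cons a L ih =>
    rw [List.map_cons, List.min?_cons, List.min?_cons, ih]
    cases hm : L.min? with
    | none => simp
    | some m =>
      simp only [Option.elim_some, Option.map_some, Option.some.injEq]
      omega

theorem core (tgt : List String) :
    ∀ src : List String,
      combine (-1) (mIdx src tgt).min? = optInt (firstIdx tgt src) := by
  intro src
  induction src with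
  | nil =>
    have hm : mIdx [] tgt = [] := by
      simp [mIdx, PySem.List.index?_eq_idxOf?]
    simp [hm, combine, firstIdx, optInt]
  | cons s rest ih =>
    by_cases h : aInner s tgt = true
    · obtain ⟨t, htmem, hts⟩ := (aInner_iff tgt s).mp h
      have h0 : (0 : Nat) ∈ mIdx (s :: rest) tgt := by
        rw [mIdx, List.mem_filterMap]
        exact ⟨t, htmem, by rw [← hts]; exact PySem.List.index?_cons_self s rest⟩
      have hmin : (mIdx (s :: rest) tgt).min? = some 0 :=
        List.min?_eq_some_iff.mpr ⟨h0, fun b _ => Nat.zero_le b⟩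
      simp [hmin, combine, firstIdx, h, optInt]
    · have hne : ∀ t ∈ tgt, s ≠ pyTrim t := by
        intro t ht heq
        exact h ((aInner_iff tgt s).mpr ⟨t, ht, heq⟩)
      have hm : mIdx (s :: rest) tgt = (mIdx rest tgt).map (· + 1) := by
        rw [mIdx, List.filterMap_congr
          (fun t ht => PySem.List.index?_cons_of_ne rest (hne t ht)), mIdx, List.map_filterMap]
      have hIH := ih
      rw [combine_neg_one] at hIH
      rw [hm, min?_map_succ, combine_neg_one]
      simp only [firstIdx, h, Bool.false_eq_true, if_false]
      cases hmin : (mIdx rest tgt).min? with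
      | none =>
        rw [hmin] at hIH
        cases hf : firstIdx tgt rest with
        | none => rfl
        | some j =>
          rw [hf] at hIH
          have hj : (-1 : Int) = (j : Int) := hIH
          omega
      | some m =>
        rw [hmin] at hIH
        cases hf : firstIdx tgt rest with
        | none =>
          rw [hf] at hIH
          have hj : (m : Int) = (-1 : Int) := hIH
          omega
        | some j =>
          rw [hf] at hIH
          have hj : (m : Int) = (j : Int) := hIH
          show ((m + 1 : Nat) : Int) = ((j + 1 : Nat) : Int)
          push_cast
          omega

-- ===== VERDICT (by name: the statement is the Claim_ definition above) =====
theorem get_first_in_index_spec : Claim_equal_get_first_in_index := by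
  intro src tgt _
  unfold Spec_get_first_in_index get_first_in_index get_first_in_index_alt
  rw [fold_eq src tgt (-1), core tgt src, aOuter_eq tgt src 0]
  cases hf : firstIdx tgt src with
  | none => rfl
  | some j => simp [optInt]
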